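-- pv_equiv track=rewrite | github.com/pypi-data/pypi-mirror-271 | packages/macal/macal-5.5.0a10.tar.gz/macal-5.5.0a10/src/macal/frontend/mlexer.py | scan_string
-- ===== SOURCE A (Python) =====
-- TAB_SIZE = 4
--
-- def scan_string(istr: str, l: int, c: int) -> tuple[int, int]:
--     for ch in istr:
--         if ch == "\n":
--             l += 1
--             c = 1
--         if ch == "\t":
--             c += TAB_SIZE - 1
--         c += 1
--     return l, c
-- ===== SOURCE B (Python) =====
-- TAB_SIZE = 4
--
-- def scan_string(istr: str, l: int, c: int) -> tuple[int, int]: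
--     # One reverse pass: count newlines and sum column widths of the tail
--     # after the last newline, then combine in closed form.
--     nl = 0
--     col = 0
--     counting = True
--     for ch in reversed(istr):
--         if ch == "\n":
--             nl += 1
--             counting = False
--         elif counting:
--             col += TAB_SIZE if ch == "\t" else 1
--     return l + nl, (2 + col) if nl else (c + col)
-- ===== Notes on version B (the rewrite author's own statement) =====
-- stated objective: alternative
-- what changed: B replaces A's forward character-by-character line/column simulation with a single reverse pass that counts newlines and sums the column width of the tail after the last newline, combining the results in closed form (base 2 after a newline, original c otherwise).
import Mathlib
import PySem

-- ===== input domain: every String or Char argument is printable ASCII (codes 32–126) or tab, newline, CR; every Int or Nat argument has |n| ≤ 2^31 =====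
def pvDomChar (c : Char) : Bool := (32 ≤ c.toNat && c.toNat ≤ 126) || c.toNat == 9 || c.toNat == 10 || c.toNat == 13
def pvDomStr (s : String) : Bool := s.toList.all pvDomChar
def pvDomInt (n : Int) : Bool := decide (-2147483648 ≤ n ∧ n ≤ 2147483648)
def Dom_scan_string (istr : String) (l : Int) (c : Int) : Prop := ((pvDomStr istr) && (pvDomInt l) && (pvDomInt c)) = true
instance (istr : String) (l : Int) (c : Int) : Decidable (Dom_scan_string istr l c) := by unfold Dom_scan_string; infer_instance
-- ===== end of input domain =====

-- B replaces A's forward line/column simulation by one reverse pass plus a closed-form combine; alternative structure, same cost.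

-- ===== PORT A =====
def scan_string (istr : String) (l : Int) (c : Int) : Int × Int :=
  istr.toList.foldl (fun (p : Int × Int) ch =>
    let lc := if ch = '\n' then (p.1 + 1, (1 : Int)) else p
    let c2 := if ch = '\t' then lc.2 + (4 - 1) else lc.2
    (lc.1, c2 + 1)) (l, c)

-- ===== PORT B =====
def scan_string_alt (istr : String) (l : Int) (c : Int) : Int × Int :=
  let st := istr.toList.reverse.foldl (fun (s : Int × Int × Bool) ch =>
    if ch = '\n' then (s.1 + 1, s.2.1, false)
    else if s.2.2 then (s.1, s.2.1 + (if ch = '\t' then 4 else 1), true)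
    else s) (0, 0, true)
  (l + st.1, if st.1 ≠ 0 then 2 + st.2.1 else c + st.2.1)

-- ===== PRECONDITION & SPEC =====
def Spec_scan_string (istr : String) (l : Int) (c : Int) (out : Int × Int) : Prop := out = scan_string_alt istr l c
instance (istr : String) (l : Int) (c : Int) (out : Int × Int) : Decidable (Spec_scan_string istr l c out) := by unfold Spec_scan_string; infer_instance

-- ===== CLAIM (what is proved, stated in full; the proofs are below) =====
def Claim_equal_scan_string : Prop := ∀ (istr : String) (l : Int) (c : Int), Dom_scan_string istr l c → Spec_scan_string istr l c (scan_string istr l c)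

-- ===== LEMMAS AND PROOFS =====

/-- column weight of one character -/
def pvW (ch : Char) : Int := if ch = '\t' then 4 else 1

/-- column contribution of the segment before the first `'\n'` of a (reversed) list -/
def pvPc : List Char → Int
  | [] => 0
  | ch :: r => if ch = '\n' then 0 else pvW ch + pvPc r

/-- A's loop body -/
def pvStepA (p : Int × Int) (ch : Char) : Int × Int :=
  let lc := if ch = '\n' then (p.1 + 1, (1 : Int)) else p
  let c2 := if ch = '\t' then lc.2 + (4 - 1) else lc.2
  (lc.1, c2 + 1)

/-- B's loop body -/
def pvStepB (s : Int × Int × Bool) (ch : Char) : Int × Int × Bool :=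
  if ch = '\n' then (s.1 + 1, s.2.1, false)
  else if s.2.2 then (s.1, s.2.1 + (if ch = '\t' then 4 else 1), true)
  else s

theorem pvFoldB_false (r : List Char) (nl col : Int) :
    r.foldl pvStepB (nl, col, false) = (nl + (r.count '\n' : Int), col, false) := by
  induction r generalizing nl col with
  | nil => simp
  | cons ch r ih =>
    by_cases h : ch = '\n' <;> simp [pvStepB, h, ih] <;> ring

theorem pvFoldB_true (r : List Char) (nl col : Int) :
    r.foldl pvStepB (nl, col, true) =
      (nl + (r.count '\n' : Int), col + pvPc r, decide ('\n' ∉ r)) := by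
  induction r generalizing nl col with
  | nil => simp [pvPc]
  | cons ch r ih =>
    by_cases h : ch = '\n'
    · simp [pvStepB, h, pvFoldB_false, pvPc]
      ring
    · have h' : ¬'\n' = ch := fun e => h e.symm
      simp [pvStepB, h, h', ih, pvPc, pvW]
      ring

theorem pvFoldA (s : List Char) (l c : Int) :
    s.foldl pvStepA (l, c) =
      (l + (s.count '\n' : Int),
        if '\n' ∈ s then 2 + pvPc s.reverse else c + pvPc s.reverse) := by
  induction s using List.reverseRecOn generalizing l c with
  | nil => simp [pvPc]
  | append_singleton s ch ih =>
    rw [List.foldl_append, ih]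
    by_cases h : ch = '\n'
    · simp [pvStepA, h, pvPc]
      ring
    · have h' : ¬'\n' = ch := fun e => h e.symm
      by_cases ht : ch = '\t' <;>
        by_cases hm : '\n' ∈ s <;>
          simp [pvStepA, h, h', ht, hm, pvPc, pvW] <;> ring

-- ===== VERDICT (by name: the statement is the Claim_ definition above) =====
theorem scan_string_spec : Claim_equal_scan_string := by
  intro istr l c _
  show scan_string istr l c = scan_string_alt istr l c
  have hA : scan_string istr l c = istr.toList.foldl pvStepA (l, c) := rfl
  have hB : scan_string_alt istr l c =
      (let st := istr.toList.reverse.foldl pvStepB (0, 0, true)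
       (l + st.1, if st.1 ≠ 0 then 2 + st.2.1 else c + st.2.1)) := rfl
  rw [hA, hB, pvFoldA, pvFoldB_true]
  have hcnt : (istr.toList.reverse.count '\n') = istr.toList.count '\n' :=
    List.count_reverse
  have hmem : '\n' ∈ istr.toList ↔ (istr.toList.count '\n' : Int) ≠ 0 := by
    rw [← List.count_pos_iff]
    omega
  by_cases hm : '\n' ∈ istr.toList
  · have hne : (istr.toList.count '\n' : Int) ≠ 0 := hmem.mp hm
    simp [hcnt, hm]
    intro h0
    exact absurd (by exact_mod_cast h0) hne
  · have : (istr.toList.count '\n' : Int) = 0 := by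
      by_contra h; exact hm (hmem.mpr h)
    simp [hcnt, hm, this]
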